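-- pv_equiv track=rewrite | github.com/staslist/A-Lister | ProcessUserInput.py | Process_Query_ALL_Directions
-- ===== SOURCE A (Python) =====
-- def Process_Query_ALL_Directions(query:str)->list:
--     ''' The queries containing any ALL directions need to be translated
--     into multiple non-ALL queries. '''
--     queries = [query]
--     temp = []
--     num_all = query.count('ALL')
--     if(num_all == 0):
--         return [query]
--     else:
--         i = 0
--         while i < num_all:
--             for query in queries:
--                 index = query.find('ALL')
--                 up_query = query.replace('ALL', 'UP', 1)
--                 down_query = query.replace('ALL', 'DOWN', 1)
--                 temp.append(up_query)
--                 temp.append(down_query)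
--             queries = temp
--             temp = []
--             i = i + 1
--
--     return queries
-- ===== SOURCE B (Python) =====
-- def Process_Query_ALL_Directions(query: str) -> list:
--     ''' The queries containing any ALL directions need to be translated
--     into multiple non-ALL queries. '''
--     def expand(query, n):
--         if n == 0:
--             return [query]
--         up_query = query.replace('ALL', 'UP', 1)
--         down_query = query.replace('ALL', 'DOWN', 1)
--         return expand(up_query, n - 1) + expand(down_query, n - 1)
--     return expand(query, query.count('ALL'))
-- ===== Notes on version B (the rewrite author's own statement) =====
-- stated objective: simpler
-- what changed: Replaced A's level-by-level breadth-first rebuilding of the whole query list (a while loop over rounds with a temp list) by a direct depth-first recursion that expands the first remaining direction keyword into its UP and DOWN variants and concatenates the two subtrees.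
import Mathlib
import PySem

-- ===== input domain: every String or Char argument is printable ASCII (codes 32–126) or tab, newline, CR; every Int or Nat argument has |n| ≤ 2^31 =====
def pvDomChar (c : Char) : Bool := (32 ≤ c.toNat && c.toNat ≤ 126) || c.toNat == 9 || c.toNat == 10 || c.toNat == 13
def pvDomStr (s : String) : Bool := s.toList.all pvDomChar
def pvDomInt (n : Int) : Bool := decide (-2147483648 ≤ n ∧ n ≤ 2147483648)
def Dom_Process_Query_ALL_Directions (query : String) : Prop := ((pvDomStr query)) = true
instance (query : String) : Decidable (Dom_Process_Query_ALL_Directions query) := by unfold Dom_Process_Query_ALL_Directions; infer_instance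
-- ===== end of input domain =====

-- B replaces A's breadth-first level-by-level list rebuilding by a depth-first
-- recursion on the number of 'ALL' occurrences (objective: simpler).


-- shared primitive helper: Python's s.replace(old, new, 1) — replace the FIRST
-- occurrence of old; exact for old ≠ "" (both ports only call it with old = "ALL").
def pyReplace1 (s old new : String) : String :=
  let i := PySem.Str.find s old
  if i = -1 then s
  else String.ofList (s.toList.take i.toNat ++ new.toList ++ s.toList.drop (i.toNat + old.toList.length))

-- ===== PORT A =====
-- the body of A's 'for query in queries' loop, appending to temp
-- (A also binds 'index = query.find('ALL')' and never uses it; omitted as dead code)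
def pvStepA (queries : List String) : List String :=
  queries.foldl (fun temp query =>
    let up_query := pyReplace1 query "ALL" "UP"
    let down_query := pyReplace1 query "ALL" "DOWN"
    temp ++ [up_query] ++ [down_query]) []

-- A's 'while i < num_all' loop, counting the remaining rounds
def pvLoopA : Nat → List String → List String
  | 0, queries => queries
  | i + 1, queries => pvLoopA i (pvStepA queries)

def Process_Query_ALL_Directions (query : String) : List String :=
  let num_all := PySem.Str.count query "ALL"
  if num_all = 0 then [query]
  else pvLoopA num_all [query]

-- ===== PORT B =====
-- Source B's inner 'expand(query, n)': depth-first, UP subtree before DOWN subtree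
def pvExpand : String → Nat → List String
  | query, 0 => [query]
  | query, n + 1 =>
    pvExpand (pyReplace1 query "ALL" "UP") n ++ pvExpand (pyReplace1 query "ALL" "DOWN") n

def Process_Query_ALL_Directions_alt (query : String) : List String :=
  pvExpand query (PySem.Str.count query "ALL")

-- ===== PRECONDITION & SPEC =====
def Spec_Process_Query_ALL_Directions (query : String) (out : List String) : Prop := out = Process_Query_ALL_Directions_alt query
instance (query : String) (out : List String) : Decidable (Spec_Process_Query_ALL_Directions query out) := by unfold Spec_Process_Query_ALL_Directions; infer_instance

-- ===== CLAIM (what is proved, stated in full; the proofs are below) =====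
def Claim_equal_Process_Query_ALL_Directions : Prop := ∀ (query : String), Dom_Process_Query_ALL_Directions query → Spec_Process_Query_ALL_Directions query (Process_Query_ALL_Directions query)

-- ===== LEMMAS AND PROOFS =====

-- one round of A's loop expands every query in place, in order
theorem pvStepA_eq_flatMap (qs : List String) :
    pvStepA qs = qs.flatMap (fun q => [pyReplace1 q "ALL" "UP", pyReplace1 q "ALL" "DOWN"]) := by
  unfold pvStepA
  simpa using PySem.List.foldl_append_eq_flatMap
    (fun q => [pyReplace1 q "ALL" "UP", pyReplace1 q "ALL" "DOWN"]) qs []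

-- n rounds of A's breadth-first loop produce exactly B's depth-first expansion
-- of each query, concatenated in order
theorem pvLoopA_eq_flatMap_expand (n : Nat) :
    ∀ qs : List String, pvLoopA n qs = qs.flatMap (fun q => pvExpand q n) := by
  induction n with
  | zero => intro qs; simp [pvLoopA, pvExpand]
  | succ n ih =>
    intro qs
    rw [pvLoopA, ih, pvStepA_eq_flatMap, List.flatMap_assoc]
    simp [pvExpand]

-- ===== VERDICT (by name: the statement is the Claim_ definition above) =====
theorem Process_Query_ALL_Directions_spec : Claim_equal_Process_Query_ALL_Directions := by
  intro query _
  unfold Spec_Process_Query_ALL_Directions Process_Query_ALL_Directions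
    Process_Query_ALL_Directions_alt
  simp only [PySem.Str.count_eq]
  by_cases h : PySem.Chars.count query.toList "ALL".toList = 0
  · rw [if_pos h, h]
    rfl
  · rw [if_neg h, pvLoopA_eq_flatMap_expand]
    simp
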